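-- pv_equiv track=rewrite | github.com/ktouloumis/Skyline-Queries | Preprocess/SkAlgs.py | BNL
-- ===== SOURCE A (Python) =====
-- import numbers
--
-- def BNL(ls, N):
--     #input parameters
--     #ls: a list with the objects,
--     #N: the number of dimensions
--
--     #output
--     #window: a list containing the ids of the skyline objects
--
--     #window for comparing
--     window = []
--
--     #place the first id in the window
--     window.append(0)
--
--     for idx in range(1, len(ls)):
--         dom = False
--         #compare each object with the window
--         for witem in window:
--             if comp_k(ls[witem], ls[idx], N, N):
--                 #object is dominated by the window
--                 dom = True
--
--         if dom == False:
--             #append object to window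
--             window.append(idx)
--
--             #delete all the objects in the window dominated by element
--             window = [x for x in window if not comp_k(ls[idx], ls[x], len(ls[1]), N)]
--
--     return window
--
-- def count(ls):
--     #takes a list of 'LS', 'GR', 'EQ'
--     #and returns a dictionary with the values
--     ctEQ = ctGR = ctLS = 0
--     for item in ls:
--         if item == 'LS':
--             ctLS = ctLS+1
--         elif item == 'GR':
--             ctGR = ctGR+1
--         elif item == 'EQ':
--             ctEQ = ctEQ+1
--     dict = {'LS':ctLS, 'GR':ctGR, 'EQ':ctEQ}
--     return dict
--
-- def compare(a,b):
--     #compares a and b and returns 'GR','LS','EQ'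
--     if isinstance(a, numbers.Number):
--         if a>b:
--             return 'GR'
--         elif a<b:
--             return 'LS'
--         else:
--             return 'EQ'
--     else:
--         if (a[0]==b[0] and a[1] == b[1]):
--             return 'EQ'
--         elif (b[0]>=a[0] and b[1]<= a[1]):
--             return 'GR'
--         elif (a[0] >= b[0] and a[1] <= b[1]):
--             return 'LS'
--         else:
--             return 'INC'
--
-- def comp_k(a, b, K, N):
--     #returns True if a k-dominates b
--     #returns False otherwise
--     res=[]
--     for aitem, bitem in zip(a, b):
--         res.append(compare(aitem,bitem))
--         dict = count(res)
--
--     if (K==N):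
--         if dict['EQ']==N:
--             return False
--         if 'INC' in res:
--             return False
--         c = dict['GR']+dict['EQ']
--         if c==N:
--             return True
--         return False
--
--     if dict['GR']>=1 and dict['EQ']>=K-dict['GR']:
--         return True
--     return False
-- ===== SOURCE B (Python) =====
-- def counts(a, b):
--     # coordinate summary of a against b: (#greater, #equal) over the paired coordinates
--     g = e = 0
--     for x, y in zip(a, b):
--         if x > y:
--             g += 1
--         elif x == y:
--             e += 1
--     return g, e
--
--
-- def BNL(ls, N):
--     # Phase 1: compare every pair of objects once, keeping only the two counts.
--     cmp = [[counts(a, b) for b in ls] for a in ls]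
--
--     def dominates(i, j, K):
--         # object i k-dominates object j, read off the precomputed counts
--         g, e = cmp[i][j]
--         if K == N:
--             return g >= 1 and g + e == N
--         return g >= 1 and e >= K - g
--
--     # Phase 2: skyline maintenance purely on indices and the table.
--     skyline = [0]
--     for idx in range(1, len(ls)):
--         if any(dominates(w, idx, N) for w in skyline):
--             continue
--         K = len(ls[1])  # k-dominance cutoff used by the purge step
--         skyline = [w for w in skyline if not dominates(idx, w, K)] + [idx]
--     return skyline
-- ===== Notes on version B (the rewrite author's own statement) =====
-- stated objective: faster
-- what changed: B splits the work into two phases: a comparison pass that records, for every ordered pair of objects, just the (greater, equal) coordinate counts, and a selection pass that maintains the skyline purely on indices by arithmetic over that table, with any() short-circuiting the domination scan; A instead interleaves comparison with selection and, per coordinate, rebuilds the whole label list and recounts it (count(res) inside the zip loop). Pre_ excludes only the inputs where A raises NameError (two or more objects and some empty object, so comp_k's zip loop never binds `dict`).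
import Mathlib
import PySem

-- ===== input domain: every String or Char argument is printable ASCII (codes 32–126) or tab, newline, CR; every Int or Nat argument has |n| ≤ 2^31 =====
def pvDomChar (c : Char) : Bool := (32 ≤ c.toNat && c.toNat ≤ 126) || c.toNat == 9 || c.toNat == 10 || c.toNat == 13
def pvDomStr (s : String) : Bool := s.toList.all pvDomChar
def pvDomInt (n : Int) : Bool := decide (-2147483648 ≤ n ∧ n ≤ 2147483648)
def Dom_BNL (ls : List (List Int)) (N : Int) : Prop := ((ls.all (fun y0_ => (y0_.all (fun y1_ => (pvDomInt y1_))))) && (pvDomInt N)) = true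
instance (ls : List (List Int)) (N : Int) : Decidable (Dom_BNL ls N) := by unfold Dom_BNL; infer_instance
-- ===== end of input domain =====

-- B splits the work into a pairwise comparison pass that stores only (greater, equal) counts
-- and a selection pass over indices reading that table (objective: faster, O(n²N) vs A's O(n²N²)).

-- ===== PORT A =====
def pvCompare (a b : Int) : String :=
  if a > b then "GR" else if a < b then "LS" else "EQ"

def pvCount (ls : List String) : PySem.Dict String Int :=
  let c := ls.foldl (fun (c : Int × Int × Int) item =>
    if item == "LS" then (c.1 + 1, c.2.1, c.2.2)
    else if item == "GR" then (c.1, c.2.1 + 1, c.2.2)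
    else if item == "EQ" then (c.1, c.2.1, c.2.2 + 1)
    else c) (0, 0, 0)
  PySem.Dict.ofList [("LS", c.1), ("GR", c.2.1), ("EQ", c.2.2)]

-- Python rebinds `dict = count(res)` on every zip iteration; on an empty zip the name `dict`
-- stays unbound (NameError) — those calls are excluded by Pre_BNL, here the initial value is pvCount [].
def pvCompK (a b : List Int) (K N : Int) : Bool :=
  let st := (a.zip b).foldl
    (fun (st : List String × PySem.Dict String Int) p =>
      let res := st.1 ++ [pvCompare p.1 p.2]
      (res, pvCount res)) ([], pvCount [])
  if K == N then
    if st.2.getD "EQ" 0 == N then false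
    else if st.1.contains "INC" then false
    else if st.2.getD "GR" 0 + st.2.getD "EQ" 0 == N then true else false
  else
    if st.2.getD "GR" 0 ≥ 1 && st.2.getD "EQ" 0 ≥ K - st.2.getD "GR" 0 then true else false

-- indices stored in the window are genuine in-range indices, so pyGetD's default is never used
def BNL (ls : List (List Int)) (N : Int) : List Int :=
  let window : List Int := [] ++ [0]
  (PySem.List.pyRange 1 (ls.length : Int) 1).foldl (fun window idx =>
    let dom := window.foldl (fun dom witem =>
      if pvCompK (PySem.List.pyGetD ls witem []) (PySem.List.pyGetD ls idx []) N N then true else dom) false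
    if dom == false then
      let window := window ++ [idx]
      window.filter (fun x =>
        !(pvCompK (PySem.List.pyGetD ls idx []) (PySem.List.pyGetD ls x [])
            ((PySem.List.pyGetD ls 1 []).length : Int) N))
    else window) window

-- ===== PORT B =====
-- counts a b = (#coordinates where a > b, #equal), over the zipped coordinates
def bCounts (a b : List Int) : Int × Int :=
  (a.zip b).foldl (fun (c : Int × Int) p =>
    if p.1 > p.2 then (c.1 + 1, c.2)
    else if p.1 == p.2 then (c.1, c.2 + 1)
    else c) (0, 0)

-- B's local `dominates(i, j, K)`, a closure over the table `cmp` and `N`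
def bDomT (cmp : List (List (Int × Int))) (N i j K : Int) : Bool :=
  let c := PySem.List.pyGetD (PySem.List.pyGetD cmp i []) j (0, 0)
  if K == N then decide (1 ≤ c.1) && (c.1 + c.2 == N)
  else decide (1 ≤ c.1) && decide (K - c.1 ≤ c.2)

def BNL_alt (ls : List (List Int)) (N : Int) : List Int :=
  let cmp : List (List (Int × Int)) := ls.map (fun a => ls.map (fun b => bCounts a b))
  (PySem.List.pyRange 1 (ls.length : Int) 1).foldl (fun skyline idx =>
    if skyline.any (fun w => bDomT cmp N w idx N) then skyline
    else (skyline.filter (fun w =>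
        !(bDomT cmp N idx w ((PySem.List.pyGetD ls 1 []).length : Int)))) ++ [idx]) [0]

-- ===== PRECONDITION & SPEC =====
-- Pre_ excludes only inputs on which A raises: with ≥ 2 objects and some empty object, comp_k's
-- zip loop never runs and Python's `dict` is unbound (NameError).
def Pre_BNL (ls : List (List Int)) (N : Int) : Prop := ls.length ≤ 1 ∨ ∀ r ∈ ls, r ≠ []
instance (ls : List (List Int)) (N : Int) : Decidable (Pre_BNL ls N) := by unfold Pre_BNL; infer_instance
def pvWitness_BNL : List (List Int) × Int := ([[1, 2], [2, 1]], 2)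

def Spec_BNL (ls : List (List Int)) (N : Int) (out : List Int) : Prop := out = BNL_alt ls N
instance (ls : List (List Int)) (N : Int) (out : List Int) : Decidable (Spec_BNL ls N out) := by unfold Spec_BNL; infer_instance

-- ===== CLAIM (what is proved, stated in full; the proofs are below) =====
def Claim_equal_BNL : Prop := ∀ (ls : List (List Int)) (N : Int), Dom_BNL ls N → Pre_BNL ls N → Spec_BNL ls N (BNL ls N)

-- ===== LEMMAS AND PROOFS =====

-- the counts formula B's dominance test evaluates, on an arbitrary count pair
def bDomF (c : Int × Int) (K N : Int) : Bool :=
  if K == N then decide (1 ≤ c.1) && (c.1 + c.2 == N)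
  else decide (1 ≤ c.1) && decide (K - c.1 ≤ c.2)

theorem foldA (l : List (Int × Int)) (res0 : List String) :
    (l.foldl (fun (st : List String × PySem.Dict String Int) p =>
      (st.1 ++ [pvCompare p.1 p.2], pvCount (st.1 ++ [pvCompare p.1 p.2]))) (res0, pvCount res0))
    = (res0 ++ l.map (fun p => pvCompare p.1 p.2),
       pvCount (res0 ++ l.map (fun p => pvCompare p.1 p.2))) := by
  induction l generalizing res0 with
  | nil => simp
  | cons p t ih => simp [List.foldl_cons, ih (res0 ++ [pvCompare p.1 p.2])]

theorem compare_GR (a b : Int) : (pvCompare a b == "GR") = decide (a > b) := by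
  unfold pvCompare; split_ifs <;> simp_all
theorem compare_EQ (a b : Int) : (pvCompare a b == "EQ") = (a == b) := by
  unfold pvCompare; split_ifs <;> simp_all <;> omega
theorem compare_ne_INC (a b : Int) : ("INC" == pvCompare a b) = false := by
  unfold pvCompare; split_ifs <;> simp_all

theorem count_triple (res : List String) (c : Int × Int × Int) :
    res.foldl (fun (c : Int × Int × Int) item =>
      if item == "LS" then (c.1 + 1, c.2.1, c.2.2)
      else if item == "GR" then (c.1, c.2.1 + 1, c.2.2)
      else if item == "EQ" then (c.1, c.2.1, c.2.2 + 1)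
      else c) c
    = (c.1 + res.count "LS", c.2.1 + res.count "GR", c.2.2 + res.count "EQ") := by
  induction res generalizing c with
  | nil => simp
  | cons a t ih =>
    simp only [List.foldl_cons, List.count_cons, ih]
    by_cases h1 : a = "LS" <;> by_cases h2 : a = "GR" <;> by_cases h3 : a = "EQ" <;>
      simp only [h1, h2, h3, if_true, beq_self_eq_true, Prod.mk.injEq] <;>
      simp_all <;> omega

theorem getD_triple_GR (x y z : Int) :
    (PySem.Dict.ofList [("LS", x), ("GR", y), ("EQ", z)]).getD "GR" 0 = y := rfl
theorem getD_triple_EQ (x y z : Int) :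
    (PySem.Dict.ofList [("LS", x), ("GR", y), ("EQ", z)]).getD "EQ" 0 = z := rfl

theorem getD_pvCount_GR (res : List String) : (pvCount res).getD "GR" 0 = (res.count "GR" : Int) := by
  rw [pvCount]; simp only [count_triple, getD_triple_GR]; omega
theorem getD_pvCount_EQ (res : List String) : (pvCount res).getD "EQ" 0 = (res.count "EQ" : Int) := by
  rw [pvCount]; simp only [count_triple, getD_triple_EQ]; omega

theorem count_map_GR (l : List (Int × Int)) :
    (l.map (fun p => pvCompare p.1 p.2)).count "GR" = l.countP (fun p => decide (p.1 > p.2)) := by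
  induction l with
  | nil => rfl
  | cons p t ih =>
    simp only [List.map_cons, List.count_cons, List.countP_cons, ih, compare_GR]

theorem count_map_EQ (l : List (Int × Int)) :
    (l.map (fun p => pvCompare p.1 p.2)).count "EQ" = l.countP (fun p => p.1 == p.2) := by
  induction l with
  | nil => rfl
  | cons p t ih =>
    simp only [List.map_cons, List.count_cons, List.countP_cons, ih, compare_EQ]

theorem no_INC (l : List (Int × Int)) :
    (l.map (fun p => pvCompare p.1 p.2)).contains "INC" = false := by
  induction l with
  | nil => rfl
  | cons p t ih => simp only [List.map_cons, List.contains_cons, ih, compare_ne_INC, Bool.or_false]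

theorem bCounts_eq (a b : List Int) :
    bCounts a b = (((a.zip b).countP (fun p => decide (p.1 > p.2)) : Int),
                   ((a.zip b).countP (fun p => p.1 == p.2) : Int)) := by
  rw [bCounts]
  have h : ∀ (l : List (Int × Int)) (c : Int × Int),
      l.foldl (fun (c : Int × Int) p =>
        if p.1 > p.2 then (c.1 + 1, c.2)
        else if p.1 == p.2 then (c.1, c.2 + 1)
        else c) c
      = (c.1 + l.countP (fun p => decide (p.1 > p.2)), c.2 + l.countP (fun p => p.1 == p.2)) := by
    intro l
    induction l with
    | nil => simp
    | cons p t ih =>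
      intro c
      simp only [List.foldl_cons, List.countP_cons, ih]
      by_cases h1 : p.1 > p.2 <;> by_cases h2 : p.1 = p.2 <;>
        simp only [h1, h2, if_true, if_false, Prod.mk.injEq] <;> simp_all <;> omega
  rw [h]; simp

theorem compK_eq (a b : List Int) (K N : Int) :
    pvCompK a b K N = bDomF (bCounts a b) K N := by
  rw [pvCompK, bDomF, bCounts_eq]
  have hA := foldA (a.zip b) []
  simp only [List.nil_append] at hA
  rw [hA]
  simp only [getD_pvCount_GR, getD_pvCount_EQ, no_INC, count_map_GR, count_map_EQ]
  set g := (a.zip b).countP (fun p => decide (p.1 > p.2)) with hg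
  set e := (a.zip b).countP (fun p => p.1 == p.2) with he
  by_cases hKN : K == N
  · simp only [hKN, if_true]
    by_cases h1 : (e : Int) = N <;> by_cases h2 : (g : Int) + e = N <;> simp [h1, h2] <;> omega
  · simp only [hKN, Bool.false_eq_true, if_false, ge_iff_le]
    cases hb : (decide (1 ≤ (g:Int)) && decide (K - (g:Int) ≤ (e:Int))) <;> simp_all

theorem bCounts_self_fst (a : List Int) : (bCounts a a).1 = 0 := by
  rw [bCounts_eq]
  simp only []
  norm_num
  intro x hx
  simp [List.zip_eq_zipWith] at hx ⊢
  omega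

theorem bDomF_self (a : List Int) (K N : Int) : bDomF (bCounts a a) K N = false := by
  rw [bDomF]
  have h := bCounts_self_fst a
  split_ifs <;> simp [h]

-- table lookup resolves to the counts of the two rows
theorem bDomT_lookup (ls : List (List Int)) (N i j K : Int)
    (h0i : 0 ≤ i) (hi : i < (ls.length : Int)) (h0j : 0 ≤ j) (hj : j < (ls.length : Int)) :
    bDomT (ls.map (fun a => ls.map (fun b => bCounts a b))) N i j K
    = bDomF (bCounts (PySem.List.pyGetD ls i []) (PySem.List.pyGetD ls j [])) K N := by
  rw [bDomT, bDomF]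
  rw [PySem.List.pyGetD_eq_getElem _ _ h0i (by simpa using hi), List.getElem_map]
  rw [PySem.List.pyGetD_eq_getElem _ _ h0j (by simpa using hj), List.getElem_map]
  rw [PySem.List.pyGetD_eq_getElem _ _ h0i hi, PySem.List.pyGetD_eq_getElem _ _ h0j hj]

theorem any_of_mem_eq {α : Type} (l : List α) (p q : α → Bool)
    (h : ∀ x ∈ l, p x = q x) : l.any p = l.any q := by
  induction l with
  | nil => rfl
  | cons x t ih =>
    simp only [List.any_cons, h x (List.mem_cons_self ..),
      ih (fun y hy => h y (List.mem_cons_of_mem _ hy))]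

theorem foldl_or_any {α : Type} (l : List α) (c : α → Bool) (b : Bool) :
    l.foldl (fun d w => if c w then true else d) b = (b || l.any c) := by
  induction l generalizing b with
  | nil => simp
  | cons x t ih =>
    rw [List.foldl_cons, ih]
    cases hx : c x <;> simp [hx]

theorem loop_eq (ls : List (List Int)) (N : Int) (I : List Int)
    (hI : ∀ i ∈ I, 0 ≤ i ∧ i < (ls.length : Int)) (W : List Int)
    (hW : ∀ w ∈ W, 0 ≤ w ∧ w < (ls.length : Int)) :
    I.foldl (fun window idx =>
      let dom := window.foldl (fun dom witem =>
        if pvCompK (PySem.List.pyGetD ls witem []) (PySem.List.pyGetD ls idx []) N N then true else dom) false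
      if dom == false then
        let window := window ++ [idx]
        window.filter (fun x =>
          !(pvCompK (PySem.List.pyGetD ls idx []) (PySem.List.pyGetD ls x [])
              ((PySem.List.pyGetD ls 1 []).length : Int) N))
      else window) W
    = I.foldl (fun skyline idx =>
      if skyline.any (fun w => bDomT (ls.map (fun a => ls.map (fun b => bCounts a b))) N w idx N) then skyline
      else (skyline.filter (fun w =>
          !(bDomT (ls.map (fun a => ls.map (fun b => bCounts a b))) N idx w
              ((PySem.List.pyGetD ls 1 []).length : Int)))) ++ [idx]) W := by
  induction I generalizing W with
  | nil => rfl
  | cons j I ih =>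
    have hj := hI j (List.mem_cons_self ..)
    have hI' : ∀ i ∈ I, 0 ≤ i ∧ i < (ls.length : Int) := fun i hi => hI i (List.mem_cons_of_mem _ hi)
    rw [List.foldl_cons, List.foldl_cons]
    -- the two step results coincide and preserve the range invariant
    have hany : ∀ w ∈ W, ∀ K,
        pvCompK (PySem.List.pyGetD ls w []) (PySem.List.pyGetD ls j []) N N
          = bDomT (ls.map (fun a => ls.map (fun b => bCounts a b))) N w j N ∧
        pvCompK (PySem.List.pyGetD ls j []) (PySem.List.pyGetD ls w []) K N
          = bDomT (ls.map (fun a => ls.map (fun b => bCounts a b))) N j w K := by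
      intro w hw K
      have hwr := hW w hw
      constructor
      · rw [compK_eq, bDomT_lookup ls N w j N hwr.1 hwr.2 hj.1 hj.2]
      · rw [compK_eq, bDomT_lookup ls N j w K hj.1 hj.2 hwr.1 hwr.2]
    have hdom : (W.foldl (fun dom witem =>
        if pvCompK (PySem.List.pyGetD ls witem []) (PySem.List.pyGetD ls j []) N N then true else dom) false)
        = W.any (fun w => bDomT (ls.map (fun a => ls.map (fun b => bCounts a b))) N w j N) := by
      rw [foldl_or_any, Bool.false_or]
      exact any_of_mem_eq W _ _ (fun w hw => (hany w hw 0).1)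
    by_cases hc : W.any (fun w => bDomT (ls.map (fun a => ls.map (fun b => bCounts a b))) N w j N) = true
    · simp only [hdom, hc, if_true]
      have : (true == false) = false := rfl
      simp only [this, Bool.false_eq_true, if_false]
      exact ih hI' W hW
    · have hc' : W.any (fun w => bDomT (ls.map (fun a => ls.map (fun b => bCounts a b))) N w j N) = false :=
        Bool.eq_false_iff.mpr hc
      simp only [hdom, hc', beq_self_eq_true, if_true]
      have hfil : (W ++ [j]).filter (fun x =>
            !(pvCompK (PySem.List.pyGetD ls j []) (PySem.List.pyGetD ls x [])
                ((PySem.List.pyGetD ls 1 []).length : Int) N))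
          = (W.filter (fun w =>
              !(bDomT (ls.map (fun a => ls.map (fun b => bCounts a b))) N j w
                  ((PySem.List.pyGetD ls 1 []).length : Int)))) ++ [j] := by
        rw [List.filter_append]
        have hself : (!(pvCompK (PySem.List.pyGetD ls j []) (PySem.List.pyGetD ls j [])
            ((PySem.List.pyGetD ls 1 []).length : Int) N)) = true := by
          rw [compK_eq, bDomF_self]; rfl
        have htail : List.filter (fun x =>
            !(pvCompK (PySem.List.pyGetD ls j []) (PySem.List.pyGetD ls x [])
                ((PySem.List.pyGetD ls 1 []).length : Int) N)) [j] = [j] := by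
          simp [hself]
        rw [htail]
        congr 1
        apply List.filter_congr
        intro w hw
        rw [(hany w hw ((PySem.List.pyGetD ls 1 []).length : Int)).2]
      rw [hfil]
      apply ih hI'
      intro w hw
      rcases List.mem_append.mp hw with h | h
      · exact hW w (List.mem_of_mem_filter h)
      · simp at h; subst h; exact hj

theorem BNL_eq (ls : List (List Int)) (N : Int) : BNL ls N = BNL_alt ls N := by
  cases ls with
  | nil => rfl
  | cons hd tl =>
    rw [BNL, BNL_alt]
    simp only [List.nil_append]
    apply loop_eq
    · intro i hi
      rw [PySem.List.mem_pyRange_one] at hi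
      omega
    · intro w hw
      simp only [List.mem_singleton] at hw
      subst hw
      refine ⟨le_refl 0, ?_⟩
      have h1 : ((hd :: tl).length : Int) = (tl.length : Int) + 1 := by simp
      omega

-- ===== VERDICT (by name: the statement is the Claim_ definition above) =====
theorem BNL_spec : Claim_equal_BNL := by
  intro ls N _ _
  exact BNL_eq ls N
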